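-- pv_equiv track=rewrite | github.com/necantis/fermentation_game | streamlit_app/game_logic.py | determine_next_state
-- ===== SOURCE A (Python) =====
-- SCENARIO_DATA = {
--     1: {'name': '1: All Good', 'causes': [], 'sg': 1.025, 'wortTemp': 20, 'co2Activity': 20, 'ph': 4.5},
--     2: {'name': '2: Temp Control Fail', 'causes': ['C1'], 'sg': 1.018, 'wortTemp': 25.5, 'co2Activity': 40, 'ph': 4.6},
--     3: {'name': '3: Yeast Health Issue', 'causes': ['C2'], 'sg': 1.045, 'wortTemp': 19.0, 'co2Activity': 3, 'ph': 5.0},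
--     4: {'name': '4: Oxygen Exposure', 'causes': ['C3'], 'sg': 1.018, 'wortTemp': 21.0, 'co2Activity': 35, 'ph': 4.4},
--     5: {'name': '5: Sanitation Fail', 'causes': ['C4'], 'sg': 1.008, 'wortTemp': 19.5, 'co2Activity': 7, 'ph': 3.2},
--     6: {'name': '6: Temp & Yeast', 'causes': ['C1', 'C2'], 'sg': 1.050, 'wortTemp:': 25.5, 'co2Activity': 1, 'ph': 5.0},
--     7: {'name': '7: Temp & Oxygen', 'causes': ['C1', 'C3'], 'sg': 1.022, 'wortTemp': 25.5, 'co2Activity': 45, 'ph': 4.7},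
--     8: {'name': '8: Temp & Sanitation', 'causes': ['C1', 'C4'], 'sg': 1.002, 'wortTemp': 26.0, 'co2Activity': 20, 'ph': 2.8},
--     9: {'name': '9: Yeast & Oxygen', 'causes': ['C2', 'C3'], 'sg': 1.048, 'wortTemp': 19.0, 'co2Activity': 2, 'ph': 5.1},
--     10: {'name': '10: Yeast & Sanitation', 'causes': ['C2', 'C4'], 'sg': 1.010, 'wortTemp': 19.5, 'co2Activity': 4, 'ph': 3.5},
--     12: {'name': '12: Oxygen & Sanitation', 'causes': ['C3', 'C4'], 'sg': 1.005, 'wortTemp': 19.5, 'co2Activity': 10, 'ph': 3.0},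
--     13: {'name': '13: Temp, Yeast, Oxygen', 'causes': ['C1', 'C2', 'C3'], 'sg': 1.048, 'wortTemp': 25.5, 'co2Activity': 1, 'ph': 5.1},
--     14: {'name': '14: Temp, Yeast, Sanitation', 'causes': ['C1', 'C2', 'C4'], 'sg': 1.008, 'wortTemp': 26.0, 'co2Activity': 5, 'ph': 3.0},
--     15: {'name': '15: Temp, Oxygen, Sanitation', 'causes': ['C1', 'C3', 'C4'], 'sg': 1.001, 'wortTemp': 26.5, 'co2Activity': 15, 'ph': 2.7},
--     16: {'name': '16: All Together', 'causes': ['C1', 'C2', 'C3', 'C4'], 'sg': 1.040, 'wortTemp': 26.0, 'co2Activity': 2, 'ph': 3.5},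
-- }
--
-- ACTIONS = {
--     'fix_temp': {'text': 'Fix Temperature Controller', 'fixes': 'C1'},
--     'pitch_yeast': {'text': 'Pitch New/Healthy Yeast', 'fixes': 'C2'},
--     'manage_oxygen': {'text': 'Improve Oxygen Management', 'fixes': 'C3'},
--     'sterilize': {'text': 'Sterilize Equipment', 'fixes': 'C4'}
-- }
--
-- def determine_next_state(current_id, action_key):
--     """Determine next scenario based on current state and action."""
--     if current_id not in SCENARIO_DATA:
--         return current_id
--
--     current_causes = SCENARIO_DATA[current_id]['causes']
--     action_fix = ACTIONS[action_key]['fixes']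
--
--     if action_fix in current_causes:
--         remaining_causes = [c for c in current_causes if c != action_fix]
--
--         # Find scenario that matches remaining causes exactly
--         for sid, data in SCENARIO_DATA.items():
--             s_causes = data['causes']
--             if len(s_causes) == len(remaining_causes) and \
--                all(c in s_causes for c in remaining_causes):
--                 return sid
--
--     return current_id
-- ===== SOURCE B (Python) =====
-- SCENARIO_DATA = {
--     1: {'name': '1: All Good', 'causes': [], 'sg': 1.025, 'wortTemp': 20, 'co2Activity': 20, 'ph': 4.5},
--     2: {'name': '2: Temp Control Fail', 'causes': ['C1'], 'sg': 1.018, 'wortTemp': 25.5, 'co2Activity': 40, 'ph': 4.6},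
--     3: {'name': '3: Yeast Health Issue', 'causes': ['C2'], 'sg': 1.045, 'wortTemp': 19.0, 'co2Activity': 3, 'ph': 5.0},
--     4: {'name': '4: Oxygen Exposure', 'causes': ['C3'], 'sg': 1.018, 'wortTemp': 21.0, 'co2Activity': 35, 'ph': 4.4},
--     5: {'name': '5: Sanitation Fail', 'causes': ['C4'], 'sg': 1.008, 'wortTemp': 19.5, 'co2Activity': 7, 'ph': 3.2},
--     6: {'name': '6: Temp & Yeast', 'causes': ['C1', 'C2'], 'sg': 1.050, 'wortTemp:': 25.5, 'co2Activity': 1, 'ph': 5.0},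
--     7: {'name': '7: Temp & Oxygen', 'causes': ['C1', 'C3'], 'sg': 1.022, 'wortTemp': 25.5, 'co2Activity': 45, 'ph': 4.7},
--     8: {'name': '8: Temp & Sanitation', 'causes': ['C1', 'C4'], 'sg': 1.002, 'wortTemp': 26.0, 'co2Activity': 20, 'ph': 2.8},
--     9: {'name': '9: Yeast & Oxygen', 'causes': ['C2', 'C3'], 'sg': 1.048, 'wortTemp': 19.0, 'co2Activity': 2, 'ph': 5.1},
--     10: {'name': '10: Yeast & Sanitation', 'causes': ['C2', 'C4'], 'sg': 1.010, 'wortTemp': 19.5, 'co2Activity': 4, 'ph': 3.5},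
--     12: {'name': '12: Oxygen & Sanitation', 'causes': ['C3', 'C4'], 'sg': 1.005, 'wortTemp': 19.5, 'co2Activity': 10, 'ph': 3.0},
--     13: {'name': '13: Temp, Yeast, Oxygen', 'causes': ['C1', 'C2', 'C3'], 'sg': 1.048, 'wortTemp': 25.5, 'co2Activity': 1, 'ph': 5.1},
--     14: {'name': '14: Temp, Yeast, Sanitation', 'causes': ['C1', 'C2', 'C4'], 'sg': 1.008, 'wortTemp': 26.0, 'co2Activity': 5, 'ph': 3.0},
--     15: {'name': '15: Temp, Oxygen, Sanitation', 'causes': ['C1', 'C3', 'C4'], 'sg': 1.001, 'wortTemp': 26.5, 'co2Activity': 15, 'ph': 2.7},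
--     16: {'name': '16: All Together', 'causes': ['C1', 'C2', 'C3', 'C4'], 'sg': 1.040, 'wortTemp': 26.0, 'co2Activity': 2, 'ph': 3.5},
-- }
--
-- ACTIONS = {
--     'fix_temp': {'text': 'Fix Temperature Controller', 'fixes': 'C1'},
--     'pitch_yeast': {'text': 'Pitch New/Healthy Yeast', 'fixes': 'C2'},
--     'manage_oxygen': {'text': 'Improve Oxygen Management', 'fixes': 'C3'},
--     'sterilize': {'text': 'Sterilize Equipment', 'fixes': 'C4'}
-- }
--
-- # Precomputed once: cause-set -> scenario id (cause sets are unique in SCENARIO_DATA).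
-- CAUSE_INDEX = {frozenset(d['causes']): sid for sid, d in SCENARIO_DATA.items()}
--
-- def determine_next_state(current_id, action_key):
--     """Determine next scenario based on current state and action."""
--     data = SCENARIO_DATA.get(current_id)
--     if data is None:
--         return current_id
--     action_fix = ACTIONS[action_key]['fixes']
--     causes = data['causes']
--     if action_fix not in causes:
--         return current_id
--     remaining = frozenset(causes) - {action_fix}
--     return CAUSE_INDEX.get(remaining, current_id)
-- ===== Notes on version B (the rewrite author's own statement) =====
-- stated objective: simpler
-- what changed: Replaced A's inner linear scan over SCENARIO_DATA with a len/all subset check by a module-level precomputed dict frozenset(causes) -> scenario id, so the next state is one hashed lookup; equivalence holds because cause sets in SCENARIO_DATA are unique.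
import Mathlib
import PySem

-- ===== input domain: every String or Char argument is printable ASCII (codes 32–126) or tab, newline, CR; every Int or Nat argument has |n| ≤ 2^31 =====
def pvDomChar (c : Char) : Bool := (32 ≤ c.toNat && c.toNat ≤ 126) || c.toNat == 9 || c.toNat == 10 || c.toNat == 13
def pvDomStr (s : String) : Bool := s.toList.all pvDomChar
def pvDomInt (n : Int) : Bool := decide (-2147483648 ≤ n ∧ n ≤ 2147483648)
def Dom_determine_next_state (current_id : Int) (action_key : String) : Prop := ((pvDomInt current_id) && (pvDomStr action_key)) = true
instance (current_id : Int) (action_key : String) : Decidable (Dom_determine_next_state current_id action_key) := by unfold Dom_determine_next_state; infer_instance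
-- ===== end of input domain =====

-- B replaces A's inner scan over all scenarios (length + subset test per entry) with a
-- precomputed cause-set -> scenario-id index looked up once; return value only, no mutation.


-- ===== PORT A =====
-- SCENARIO_DATA, restricted to the 'causes' field (the only field the function reads), insertion order
def scenData : List (Int × List String) :=
  [(1, []), (2, ["C1"]), (3, ["C2"]), (4, ["C3"]), (5, ["C4"]),
   (6, ["C1", "C2"]), (7, ["C1", "C3"]), (8, ["C1", "C4"]), (9, ["C2", "C3"]),
   (10, ["C2", "C4"]), (12, ["C3", "C4"]), (13, ["C1", "C2", "C3"]),
   (14, ["C1", "C2", "C4"]), (15, ["C1", "C3", "C4"]), (16, ["C1", "C2", "C3", "C4"])]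

-- ACTIONS, restricted to the 'fixes' field
def actFixes : List (String × String) :=
  [("fix_temp", "C1"), ("pitch_yeast", "C2"), ("manage_oxygen", "C3"), ("sterilize", "C4")]

-- the for-loop: first scenario whose causes have the same length and contain all remaining causes
def scanScen (rem : List String) (cur : Int) : List (Int × List String) → Int
  | [] => cur
  | (sid, sc) :: rest =>
    if sc.length = rem.length ∧ rem.all (fun c => c ∈ sc) then sid else scanScen rem cur rest

def determine_next_state (current_id : Int) (action_key : String) : Int :=
  match List.lookup current_id scenData with
  | none => current_id                  -- current_id not in SCENARIO_DATA
  | some current_causes =>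
    match List.lookup action_key actFixes with
    | none => current_id                -- Python raises KeyError here: outside Pre_
    | some action_fix =>
      if action_fix ∈ current_causes then
        scanScen (current_causes.filter (fun c => c ≠ action_fix)) current_id scenData
      else current_id

-- ===== PORT B =====
-- precomputed module-level index: frozenset(causes) -> scenario id
def causeIndex : List (List String × Int) :=
  [([], 1), (["C1"], 2), (["C2"], 3), (["C3"], 4), (["C4"], 5),
   (["C1", "C2"], 6), (["C1", "C3"], 7), (["C1", "C4"], 8), (["C2", "C3"], 9),
   (["C2", "C4"], 10), (["C3", "C4"], 12), (["C1", "C2", "C3"], 13),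
   (["C1", "C2", "C4"], 14), (["C1", "C3", "C4"], 15), (["C1", "C2", "C3", "C4"], 16)]

-- frozenset keys ported as their duplicate-free element lists; lookup compares as sets
-- (mutual membership), exact for frozenset equality since the lists are duplicate-free
def fsGet? (rem : List String) : List (List String × Int) → Option Int
  | [] => none
  | (k, sid) :: rest =>
    if k.all (fun c => c ∈ rem) && rem.all (fun c => c ∈ k) then some sid else fsGet? rem rest

def determine_next_state_alt (current_id : Int) (action_key : String) : Int :=
  match List.lookup current_id scenData with
  | none => current_id                  -- SCENARIO_DATA.get(current_id) is None
  | some causes =>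
    match List.lookup action_key actFixes with
    | none => current_id                -- Python raises KeyError here: outside Pre_
    | some action_fix =>
      if action_fix ∈ causes then
        (fsGet? (causes.filter (fun c => c ≠ action_fix)) causeIndex).getD current_id
      else current_id

-- ===== PRECONDITION & SPEC =====
-- Pre_ excludes exactly the inputs where both Pythons raise KeyError: a known scenario id
-- together with an action_key that is not a key of ACTIONS.
def Pre_determine_next_state (current_id : Int) (action_key : String) : Prop :=
  current_id ∈ ([1, 2, 3, 4, 5, 6, 7, 8, 9, 10, 12, 13, 14, 15, 16] : List Int) →
    action_key ∈ (["fix_temp", "pitch_yeast", "manage_oxygen", "sterilize"] : List String)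
instance (current_id : Int) (action_key : String) : Decidable (Pre_determine_next_state current_id action_key) := by unfold Pre_determine_next_state; infer_instance

def pvWitness_determine_next_state : Int × String := (6, "fix_temp")

def Spec_determine_next_state (current_id : Int) (action_key : String) (out : Int) : Prop := out = determine_next_state_alt current_id action_key
instance (current_id : Int) (action_key : String) (out : Int) : Decidable (Spec_determine_next_state current_id action_key out) := by unfold Spec_determine_next_state; infer_instance

-- ===== CLAIM (what is proved, stated in full; the proofs are below) =====
def Claim_equal_determine_next_state : Prop := ∀ (current_id : Int) (action_key : String), Dom_determine_next_state current_id action_key → Pre_determine_next_state current_id action_key → Spec_determine_next_state current_id action_key (determine_next_state current_id action_key)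

-- ===== LEMMAS AND PROOFS =====

-- when current_id is not a scenario id, both ports return it unchanged
theorem both_id_of_unknown (current_id : Int) (action_key : String)
    (hc : current_id ∉ ([1, 2, 3, 4, 5, 6, 7, 8, 9, 10, 12, 13, 14, 15, 16] : List Int)) :
    determine_next_state current_id action_key = current_id ∧
      determine_next_state_alt current_id action_key = current_id := by
  simp only [List.mem_cons, List.not_mem_nil, or_false, not_or] at hc
  obtain ⟨h1, h2, h3, h4, h5, h6, h7, h8, h9, h10, h12, h13, h14, h15, h16⟩ := hc
  have b1 := beq_eq_false_iff_ne.mpr h1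
  have b2 := beq_eq_false_iff_ne.mpr h2
  have b3 := beq_eq_false_iff_ne.mpr h3
  have b4 := beq_eq_false_iff_ne.mpr h4
  have b5 := beq_eq_false_iff_ne.mpr h5
  have b6 := beq_eq_false_iff_ne.mpr h6
  have b7 := beq_eq_false_iff_ne.mpr h7
  have b8 := beq_eq_false_iff_ne.mpr h8
  have b9 := beq_eq_false_iff_ne.mpr h9
  have b10 := beq_eq_false_iff_ne.mpr h10
  have b12 := beq_eq_false_iff_ne.mpr h12
  have b13 := beq_eq_false_iff_ne.mpr h13
  have b14 := beq_eq_false_iff_ne.mpr h14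
  have b15 := beq_eq_false_iff_ne.mpr h15
  have b16 := beq_eq_false_iff_ne.mpr h16
  constructor <;>
    simp [determine_next_state, determine_next_state_alt, scenData, List.lookup,
      b1, b2, b3, b4, b5, b6, b7, b8, b9, b10, b12, b13, b14, b15, b16]

-- ===== VERDICT (by name: the statement is the Claim_ definition above) =====
theorem determine_next_state_spec : Claim_equal_determine_next_state := by
  intro current_id action_key _ hpre
  unfold Spec_determine_next_state
  by_cases hc : current_id ∈ ([1, 2, 3, 4, 5, 6, 7, 8, 9, 10, 12, 13, 14, 15, 16] : List Int)
  · have hk := hpre hc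
    fin_cases hc <;> fin_cases hk <;> decide
  · obtain ⟨ha, hb⟩ := both_id_of_unknown current_id action_key hc
    rw [ha, hb]
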